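-- pv_equiv track=rewrite | github.com/SimeonChifligarov/Alpha_Judge_Softuni | Python_Fundamentals/Python_Fundamentals/08_02_Text_Processing_Exercise/09_Rage_Quit_v3.py | generate_rage_message
-- ===== SOURCE A (Python) =====
-- def generate_rage_message(text: str) -> tuple[int, str]:
--     """Generates the rage message and counts unique symbols without using regular expressions."""
--     rage_message = []
--     current_text = ''
--     current_number = ''
--
--     for char in text:
--         if char.isdigit():
--             current_number += char
--         else:
--             if current_number:
--                 rage_message.append(current_text.upper() * int(current_number))
--                 current_text = ''
--                 current_number = ''
--             current_text += char
--
--     if current_number: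
--         rage_message.append(current_text.upper() * int(current_number))
--
--     final_message = ''.join(rage_message)
--     unique_symbols = len(set(final_message))
--
--     return unique_symbols, final_message
-- ===== SOURCE B (Python) =====
-- def generate_rage_message(text: str) -> tuple[int, str]:
--     """Generates the rage message and counts unique symbols without using regular expressions."""
--     n = len(text)
--     digit = [c.isdigit() for c in text]
--     # cut points: run boundaries of the isdigit classification, as an index table
--     cuts = [0] + [i for i in range(1, n) if digit[i] != digit[i - 1]] + [n]
--     segs = [text[a:b] for a, b in zip(cuts, cuts[1:])]
--     parts = [prev.upper() * int(seg)
--              for prev, seg in zip([''] + segs, segs)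
--              if seg and seg[0].isdigit()]
--     final_message = ''.join(parts)
--     return len(set(final_message)), final_message
-- ===== Notes on version B (the rewrite author's own statement) =====
-- stated objective: alternative
-- what changed: Replaces A's single-pass three-accumulator state machine by a staged index-table pipeline: precompute the boundary indices where the isdigit classification changes, slice the text into segments at those cut points, then build the parts by pairing each segment with its predecessor via zip and keeping only digit-led segments; no running text/number buffers exist.
import Mathlib
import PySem

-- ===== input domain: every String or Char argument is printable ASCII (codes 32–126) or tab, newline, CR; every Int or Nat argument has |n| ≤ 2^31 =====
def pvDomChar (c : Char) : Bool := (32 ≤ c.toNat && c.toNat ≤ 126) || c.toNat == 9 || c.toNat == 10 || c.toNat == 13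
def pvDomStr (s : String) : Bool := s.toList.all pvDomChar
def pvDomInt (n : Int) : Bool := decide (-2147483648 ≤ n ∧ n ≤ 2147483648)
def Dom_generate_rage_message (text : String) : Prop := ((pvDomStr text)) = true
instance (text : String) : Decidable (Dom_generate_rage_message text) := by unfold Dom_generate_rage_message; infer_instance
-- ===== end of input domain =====

-- B replaces A's per-character state machine (three running accumulators) by a staged
-- index-table pipeline: cut points, segments sliced at them, and a zip-with-predecessor pass.

-- ===== PORT A =====
-- current_text.upper() * int(current_number); within the ASCII domain current_number is a
-- nonempty digit run, so int() cannot fail and the .getD 0 default is unreachable.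
def pvPartA (ct cn : List Char) : List Char :=
  PySem.List.pyRepeat (PySem.Chars.upper ct) ((PySem.Int.ofChars? cn).getD 0)

-- the body of A's 'for char in text' loop; state = (rage_message, current_text, current_number)
def pvStepA (st : List (List Char) × List Char × List Char) (c : Char) :
    List (List Char) × List Char × List Char :=
  let (rage, ct, cn) := st
  if PySem.Chars.isdigit c then (rage, ct, cn ++ [c])
  else if cn ≠ [] then (rage ++ [pvPartA ct cn], [c], [])
  else (rage, ct ++ [c], cn)

-- the trailing 'if current_number:' flush followed by ''.join(rage_message)
def pvFinalA (st : List (List Char) × List Char × List Char) : List Char :=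
  PySem.Chars.join [] (if st.2.2 ≠ [] then st.1 ++ [pvPartA st.2.1 st.2.2] else st.1)

def generate_rage_message (text : String) : Int × String :=
  let st := text.toList.foldl pvStepA ([], [], [])
  let fm := pvFinalA st
  (((PySem.Set.ofList fm).length : Int), String.ofList fm)

-- ===== PORT B =====
-- cuts = [0] + [i for i in range(1, n) if digit[i] != digit[i-1]] + [n]
def pvCuts (l : List Char) : List Int :=
  let digit := l.map PySem.Chars.isdigit
  [0] ++ ((PySem.List.pyRange 1 (PySem.List.len l) 1).filter
      (fun i => PySem.List.pyGetD digit i false != PySem.List.pyGetD digit (i - 1) false))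
    ++ [PySem.List.len l]

-- segs = [text[a:b] for a, b in zip(cuts, cuts[1:])]
def pvSegs (l : List Char) : List (List Char) :=
  let cuts := pvCuts l
  (cuts.zip (PySem.List.slice cuts (some 1) none)).map
    (fun ab => PySem.List.slice l (some ab.1) (some ab.2))

-- parts / join / set-count; within the ASCII domain each kept seg is a nonempty digit run,
-- so int() cannot fail and the .getD 0 default is unreachable.
def generate_rage_message_alt (text : String) : Int × String :=
  let segs := pvSegs text.toList
  let parts := ((([] :: segs).zip segs).filter
      (fun pr => match pr.2 with | [] => false | c :: _ => PySem.Chars.isdigit c)).map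
      (fun pr => PySem.List.pyRepeat (PySem.Chars.upper pr.1) ((PySem.Int.ofChars? pr.2).getD 0))
  let fm := PySem.Chars.join [] parts
  (((PySem.Set.ofList fm).length : Int), String.ofList fm)

-- ===== PRECONDITION & SPEC =====
def Spec_generate_rage_message (text : String) (out : Int × String) : Prop := out = generate_rage_message_alt text
instance (text : String) (out : Int × String) : Decidable (Spec_generate_rage_message text out) := by unfold Spec_generate_rage_message; infer_instance

-- ===== CLAIM (what is proved, stated in full; the proofs are below) =====
def Claim_equal_generate_rage_message : Prop := ∀ (text : String), Dom_generate_rage_message text → Spec_generate_rage_message text (generate_rage_message text)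

-- ===== LEMMAS AND PROOFS =====

-- the maximal runs of equal isdigit-classification, with their class flag (proof-side only)
def pvRuns : List Char → List (Bool × List Char)
  | [] => []
  | c :: cs =>
    (PySem.Chars.isdigit c,
      c :: cs.takeWhile (fun d => PySem.Chars.isdigit d == PySem.Chars.isdigit c))
      :: pvRuns (cs.dropWhile (fun d => PySem.Chars.isdigit d == PySem.Chars.isdigit c))
termination_by l => l.length
decreasing_by
  exact Nat.lt_succ_of_le (List.length_dropWhile_le _ _)

-- run-level pending/parts fold (proof-side reference point between A and B)
def pvStepB (st : List Char × List (List Char)) (r : Bool × List Char) :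
    List Char × List (List Char) :=
  let (pending, parts) := st
  if r.1 then
    ([], parts ++ [PySem.List.pyRepeat (PySem.Chars.upper pending) ((PySem.Int.ofChars? r.2).getD 0)])
  else (r.2, parts)

-- ''.join of [] separators is concatenation
theorem pv_join_nil_flatten (xs : List (List Char)) : PySem.Chars.join [] xs = xs.flatten := by
  simp only [PySem.Chars.join, List.intercalate]
  induction xs with
  | nil => rfl
  | cons a t ih =>
    cases t with
    | nil => simp
    | cons b t' => simpa [List.intersperse] using ih

-- A's loop over a digit run only extends current_number
theorem pv_foldA_digits (run : List Char) (h : ∀ c ∈ run, PySem.Chars.isdigit c = true)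
    (rage : List (List Char)) (ct cn : List Char) :
    run.foldl pvStepA (rage, ct, cn) = (rage, ct, cn ++ run) := by
  induction run generalizing cn with
  | nil => simp
  | cons c cs ih =>
    have hc := h c (by simp)
    simp only [List.foldl_cons, pvStepA, hc, if_pos]
    rw [ih (fun d hd => h d (by simp [hd]))]
    simp

-- A's loop over a non-digit run with empty current_number only extends current_text
theorem pv_foldA_nondigits (run : List Char) (h : ∀ c ∈ run, PySem.Chars.isdigit c = false)
    (rage : List (List Char)) (ct : List Char) :
    run.foldl pvStepA (rage, ct, []) = (rage, ct ++ run, []) := by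
  induction run generalizing ct with
  | nil => simp
  | cons c cs ih =>
    have hc := h c (by simp)
    simp only [List.foldl_cons, pvStepA, hc, Bool.false_eq_true,
      ne_eq, not_true_eq_false, if_neg, not_false_eq_true]
    rw [ih (fun d hd => h d (by simp [hd]))]
    simp

-- the parts accumulator of the run-level fold only appends
theorem pv_foldB_parts (rs : List (Bool × List Char)) (p : List Char) (parts : List (List Char)) :
    (rs.foldl pvStepB (p, parts)).2 = parts ++ (rs.foldl pvStepB (p, [])).2 := by
  induction rs generalizing p parts with
  | nil => simp
  | cons r rs ih =>
    simp only [List.foldl_cons, pvStepB]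
    by_cases hr : r.1 = true
    · simp only [hr, if_pos, List.nil_append]
      rw [ih, ih ([]) [_]]
      simp
    · simp only [hr, Bool.false_eq_true, if_false]
      exact ih _ _

-- main A-side invariant: A's finished message from state (rage, ct, []) = join rage ++ the
-- run-fold message from pending ct, provided ct is empty or the text starts with a digit
theorem pv_main (l : List Char) (rage : List (List Char)) (ct : List Char)
    (h : ct = [] ∨ ∀ c, l.head? = some c → PySem.Chars.isdigit c = true) :
    pvFinalA (l.foldl pvStepA (rage, ct, [])) =
      PySem.Chars.join [] rage ++ PySem.Chars.join [] ((pvRuns l).foldl pvStepB (ct, [])).2 := by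
  match l with
  | [] =>
    simp [pvFinalA, pvRuns, PySem.Chars.join_nil]
  | c :: cs =>
    have hsplit : c :: cs
        = (c :: cs.takeWhile (fun d => PySem.Chars.isdigit d == PySem.Chars.isdigit c))
          ++ cs.dropWhile (fun d => PySem.Chars.isdigit d == PySem.Chars.isdigit c) := by
      simp
    rw [pvRuns]
    by_cases hd : PySem.Chars.isdigit c = true
    · -- digit run first
      have hrun : ∀ x ∈ c :: cs.takeWhile (fun d => PySem.Chars.isdigit d == PySem.Chars.isdigit c),
          PySem.Chars.isdigit x = true := by
        intro x hx
        rcases List.mem_cons.mp hx with rfl | hx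
        · exact hd
        · have := List.mem_takeWhile_imp hx
          simpa [hd] using this
      conv_lhs => rw [hsplit]
      rw [List.foldl_append, pv_foldA_digits _ hrun]
      simp only [List.nil_append]
      cases hrest : cs.dropWhile (fun d => PySem.Chars.isdigit d == PySem.Chars.isdigit c) with
      | nil =>
        simp [pvFinalA, pvRuns, pvStepB, hd, pvPartA, pv_join_nil_flatten]
      | cons d ds =>
        have hdnd : PySem.Chars.isdigit d = false := by
          have := List.head?_dropWhile_not
            (fun d => PySem.Chars.isdigit d == PySem.Chars.isdigit c) cs
          rw [hrest] at this
          simpa [hd] using this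
        have hswap : (d :: ds).foldl pvStepA
              (rage, ct, c :: cs.takeWhile (fun e => PySem.Chars.isdigit e == PySem.Chars.isdigit c))
            = (d :: ds).foldl pvStepA
              (rage ++ [pvPartA ct (c :: cs.takeWhile (fun e => PySem.Chars.isdigit e == PySem.Chars.isdigit c))], [], []) := by
          simp [pvStepA, hdnd]
        rw [hswap]
        rw [pv_main (d :: ds) _ [] (Or.inl rfl)]
        simp only [List.foldl_cons]
        have hstepB : pvStepB (ct, [])
              (PySem.Chars.isdigit c, c :: cs.takeWhile (fun e => PySem.Chars.isdigit e == PySem.Chars.isdigit c))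
            = ([], [pvPartA ct (c :: cs.takeWhile (fun e => PySem.Chars.isdigit e == PySem.Chars.isdigit c))]) := by
          simp [pvStepB, hd, pvPartA]
        rw [hstepB]
        conv_rhs => rw [pv_foldB_parts]
        simp [pv_join_nil_flatten]
    · -- non-digit run first; A's current_text must be empty here
      have hct : ct = [] := by
        rcases h with h | h
        · exact h
        · exact absurd (h c rfl) hd
      subst hct
      have hrun : ∀ x ∈ c :: cs.takeWhile (fun d => PySem.Chars.isdigit d == PySem.Chars.isdigit c),
          PySem.Chars.isdigit x = false := by
        intro x hx
        rcases List.mem_cons.mp hx with rfl | hx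
        · simpa using hd
        · have := List.mem_takeWhile_imp hx
          simp only [beq_iff_eq] at this
          simpa [this] using hd
      conv_lhs => rw [hsplit]
      rw [List.foldl_append, pv_foldA_nondigits _ hrun]
      simp only [List.nil_append]
      cases hrest : cs.dropWhile (fun d => PySem.Chars.isdigit d == PySem.Chars.isdigit c) with
      | nil =>
        simp [pvFinalA, pvRuns, pvStepB, hd, PySem.Chars.join_nil]
      | cons d ds =>
        have hdd : PySem.Chars.isdigit d = true := by
          have := List.head?_dropWhile_not
            (fun d => PySem.Chars.isdigit d == PySem.Chars.isdigit c) cs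
          rw [hrest] at this
          simp only [List.head?_cons] at this
          simp only [Bool.not_eq_true] at hd
          by_contra hne
          simp only [Bool.not_eq_true] at hne
          simp [hne, hd] at this
        rw [pv_main (d :: ds) rage _ (Or.inr (fun e he => by
          simp only [List.head?_cons, Option.some.injEq] at he
          subst he; exact hdd))]
        simp [pvStepB, hd]
termination_by l.length
decreasing_by
  all_goals
    rw [← hrest]
    exact Nat.lt_succ_of_le (List.length_dropWhile_le _ _)

-- every cut point is nonnegative
theorem pv_cuts_nonneg (l : List Char) : ∀ x ∈ pvCuts l, 0 ≤ x := by
  intro x hx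
  simp only [pvCuts, PySem.List.len_eq, List.mem_append, List.mem_filter,
    List.mem_cons, List.not_mem_nil, or_false] at hx
  rcases hx with (rfl | ⟨hx, -⟩) | rfl
  · exact le_refl 0
  · obtain ⟨h1, -⟩ := PySem.List.mem_pyRange_one.mp hx
    omega
  · exact Int.natCast_nonneg _

-- cuts of a first homogeneous run followed by the rest
theorem pv_cuts_append (b : Bool) (r rest : List Char) (hr : r ≠ [])
    (hb : ∀ d ∈ r, PySem.Chars.isdigit d = b)
    (hrest : ∀ d, rest.head? = some d → PySem.Chars.isdigit d = !b) :
    pvCuts (r ++ rest)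
      = if rest = [] then [0, (r.length : Int)]
        else 0 :: (pvCuts rest).map (fun x => (r.length : Int) + x) := by
  have hm1 : 1 ≤ r.length := List.length_pos_of_ne_nil hr
  have hdig : (r ++ rest).map PySem.Chars.isdigit
      = List.replicate r.length b ++ rest.map PySem.Chars.isdigit := by
    rw [List.map_append]
    congr 1
    refine List.eq_replicate_iff.mpr ⟨by simp, ?_⟩
    intro x hx
    obtain ⟨d, hd, rfl⟩ := List.mem_map.mp hx
    exact hb d hd
  have h1 : ∀ j : Nat, j < r.length → ((r ++ rest).map PySem.Chars.isdigit).getD j false = b := by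
    intro j hj
    rw [hdig, List.getD_eq_getElem?_getD, List.getElem?_append_left (by simpa using hj),
      List.getElem?_replicate]
    simp [hj]
  have h2 : ∀ j : Nat, ((r ++ rest).map PySem.Chars.isdigit).getD (r.length + j) false
      = (rest.map PySem.Chars.isdigit).getD j false := by
    intro j
    rw [hdig, List.getD_eq_getElem?_getD,
      List.getElem?_append_right (by simp), List.getD_eq_getElem?_getD]
    simp
  have hPlow : ∀ i ∈ PySem.List.pyRange 1 (r.length : Int) 1,
      ¬ ((PySem.List.pyGetD ((r ++ rest).map PySem.Chars.isdigit) i false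
        != PySem.List.pyGetD ((r ++ rest).map PySem.Chars.isdigit) (i - 1) false) = true) := by
    intro i hi
    obtain ⟨hi1, hi2⟩ := PySem.List.mem_pyRange_one.mp hi
    rw [PySem.List.pyGetD_of_nonneg _ _ (by omega), PySem.List.pyGetD_of_nonneg _ _ (by omega),
      h1 i.toNat (by omega), h1 (i - 1).toNat (by omega)]
    simp
  by_cases hre : rest = []
  · rw [if_pos hre]
    subst hre
    simp only [List.append_nil] at hPlow ⊢
    simp only [pvCuts, PySem.List.len_eq]
    rw [List.filter_eq_nil_iff.mpr hPlow]
    rfl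
  · rw [if_neg hre]
    obtain ⟨d, ds, rfl⟩ : ∃ d ds, rest = d :: ds := by
      cases rest with
      | nil => exact absurd rfl hre
      | cons d ds => exact ⟨d, ds, rfl⟩
    have hdb : PySem.Chars.isdigit d = !b := hrest d rfl
    have hlen : (((r ++ d :: ds).length : Nat) : Int)
        = (r.length : Int) + ((d :: ds).length : Int) := by
      push_cast [List.length_append]
      ring
    have hPm : (PySem.List.pyGetD ((r ++ d :: ds).map PySem.Chars.isdigit) (r.length : Int) false
        != PySem.List.pyGetD ((r ++ d :: ds).map PySem.Chars.isdigit) ((r.length : Int) - 1) false)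
          = true := by
      rw [PySem.List.pyGetD_of_nonneg _ _ (by omega), PySem.List.pyGetD_of_nonneg _ _ (by omega)]
      have e1 : ((r.length : Int)).toNat = r.length + 0 := by omega
      rw [e1, h2 0, h1 ((r.length : Int) - 1).toNat (by omega)]
      simp only [List.map_cons, List.getD_cons_zero, hdb]
      cases b <;> rfl
    have hPshift : ∀ i ∈ PySem.List.pyRange 1 (((d :: ds).length : Nat) : Int) 1,
        (PySem.List.pyGetD ((r ++ d :: ds).map PySem.Chars.isdigit) ((r.length : Int) + i) false
          != PySem.List.pyGetD ((r ++ d :: ds).map PySem.Chars.isdigit) ((r.length : Int) + i - 1) false)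
        = (PySem.List.pyGetD ((d :: ds).map PySem.Chars.isdigit) i false
          != PySem.List.pyGetD ((d :: ds).map PySem.Chars.isdigit) (i - 1) false) := by
      intro i hi
      obtain ⟨hi1, hi2⟩ := PySem.List.mem_pyRange_one.mp hi
      rw [PySem.List.pyGetD_of_nonneg _ _ (by omega), PySem.List.pyGetD_of_nonneg _ _ (by omega),
        PySem.List.pyGetD_of_nonneg ((d :: ds).map PySem.Chars.isdigit) _ (by omega : (0:Int) ≤ i),
        PySem.List.pyGetD_of_nonneg ((d :: ds).map PySem.Chars.isdigit) _ (by omega : (0:Int) ≤ i - 1)]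
      have e1 : ((r.length : Int) + i).toNat = r.length + i.toNat := by omega
      have e2 : ((r.length : Int) + i - 1).toNat = r.length + (i - 1).toNat := by omega
      rw [e1, e2, h2, h2]
    have hmap : PySem.List.pyRange ((r.length : Int) + 1)
          ((r.length : Int) + (((d :: ds).length : Nat) : Int)) 1
        = (PySem.List.pyRange 1 (((d :: ds).length : Nat) : Int) 1).map
            (fun x => (r.length : Int) + x) := by
      rw [PySem.List.pyRange_one, PySem.List.pyRange_one, List.map_map]
      have e : ((r.length : Int) + ((d :: ds).length : Int) - ((r.length : Int) + 1)).toNat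
          = (((d :: ds).length : Int) - 1).toNat := by omega
      rw [e]
      exact List.map_congr_left (fun k _ => by simp only [Function.comp_apply]; ring)
    simp only [pvCuts, PySem.List.len_eq]
    rw [hlen,
      PySem.List.pyRange_one_append 1 (r.length : Int) ((r.length : Int) + (((d :: ds).length : Nat) : Int)) (by exact_mod_cast hm1) (by omega),
      List.filter_append, List.filter_eq_nil_iff.mpr hPlow,
      PySem.List.pyRange_one_cons (by simp only [List.length_cons]; omega)]
    simp only [List.filter_cons, hPm, if_true]
    rw [hmap, List.filter_map,
      List.filter_congr (fun i hi => by simp only [Function.comp_apply]; exact hPshift i hi)]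
    simp

-- the segments are exactly the runs
theorem pv_segs_runs (l : List Char) (hl : l ≠ []) :
    pvSegs l = (pvRuns l).map (·.2) := by
  match l, hl with
  | c :: cs, _ =>
    have hsplit : (c :: cs.takeWhile (fun d => PySem.Chars.isdigit d == PySem.Chars.isdigit c))
          ++ cs.dropWhile (fun d => PySem.Chars.isdigit d == PySem.Chars.isdigit c) = c :: cs := by
      simp
    have hb : ∀ d ∈ c :: cs.takeWhile (fun d => PySem.Chars.isdigit d == PySem.Chars.isdigit c),
        PySem.Chars.isdigit d = PySem.Chars.isdigit c := by
      intro d hd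
      rcases List.mem_cons.mp hd with rfl | hd
      · rfl
      · simpa using List.mem_takeWhile_imp hd
    have hrest : ∀ d, (cs.dropWhile (fun d => PySem.Chars.isdigit d == PySem.Chars.isdigit c)).head?
          = some d → PySem.Chars.isdigit d = !(PySem.Chars.isdigit c) := by
      intro d hd
      have := List.head?_dropWhile_not
        (fun d => PySem.Chars.isdigit d == PySem.Chars.isdigit c) cs
      rw [hd] at this
      cases h1 : PySem.Chars.isdigit d <;> cases h2 : PySem.Chars.isdigit c <;> simp_all
    have hcuts := pv_cuts_append (PySem.Chars.isdigit c) _ _ (by simp) hb hrest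
    rw [hsplit] at hcuts
    rw [pvRuns]
    cases hre : cs.dropWhile (fun d => PySem.Chars.isdigit d == PySem.Chars.isdigit c) with
    | nil =>
      rw [hre, if_pos rfl] at hcuts
      simp only [pvSegs, hcuts, pvRuns]
      rw [PySem.List.slice_from_one]
      simp only [List.tail_cons, List.zip_cons_cons, List.zip_nil_right, List.map_cons,
        List.map_nil, PySem.List.slice_zero_start, PySem.List.slice_to_natCast]
      rw [← hsplit, hre]
      simp
    | cons d ds =>
      rw [hre, if_neg (by simp)] at hcuts
      obtain ⟨t, ht⟩ : ∃ t, pvCuts (d :: ds) = 0 :: t := ⟨_, rfl⟩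
      rw [List.map_cons, ← pv_segs_runs (d :: ds) (by simp)]
      simp only [pvSegs, hcuts, ht, List.map_cons]
      rw [PySem.List.slice_from_one, PySem.List.slice_from_one]
      simp only [List.tail_cons, List.zip_cons_cons, List.map_cons]
      refine congrArg₂ List.cons ?_ ?_
      · -- first segment is the first run
        rw [add_zero, PySem.List.slice_zero_start, PySem.List.slice_to_natCast, ← hsplit, hre,
          List.take_left]
      · -- remaining segments are the shifted segments of the rest
        have hconv : ((((c :: cs.takeWhile (fun d => PySem.Chars.isdigit d == PySem.Chars.isdigit c)).length : Nat) : Int) + 0)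
              :: t.map (fun x => (((c :: cs.takeWhile (fun d => PySem.Chars.isdigit d == PySem.Chars.isdigit c)).length : Nat) : Int) + x)
            = ((0 : Int) :: t).map
              (fun x => (((c :: cs.takeWhile (fun d => PySem.Chars.isdigit d == PySem.Chars.isdigit c)).length : Nat) : Int) + x) := by
          simp
        rw [hconv, List.zip_map, List.map_map]
        refine List.map_congr_left ?_
        rintro ⟨a1, a2⟩ hab
        obtain ⟨ha1, ha2⟩ := List.of_mem_zip hab
        have h01 : 0 ≤ a1 := pv_cuts_nonneg (d :: ds) a1 (by rw [ht]; exact ha1)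
        have h02 : 0 ≤ a2 := pv_cuts_nonneg (d :: ds) a2
          (by rw [ht]; exact List.mem_of_mem_tail ha2)
        simp only [Function.comp_apply, Prod.map]
        rw [PySem.List.slice_toNat _ (by omega) (by omega),
          PySem.List.slice_toNat _ h01 h02, ← hsplit, hre]
        have e1 : ((((c :: cs.takeWhile (fun d => PySem.Chars.isdigit d == PySem.Chars.isdigit c)).length : Nat) : Int) + a1).toNat
            = (c :: cs.takeWhile (fun d => PySem.Chars.isdigit d == PySem.Chars.isdigit c)).length + a1.toNat := by
          omega
        have e2 : ((((c :: cs.takeWhile (fun d => PySem.Chars.isdigit d == PySem.Chars.isdigit c)).length : Nat) : Int) + a2).toNat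
            = (c :: cs.takeWhile (fun d => PySem.Chars.isdigit d == PySem.Chars.isdigit c)).length + a2.toNat := by
          omega
        have hdrop : List.drop
              ((c :: cs.takeWhile (fun d => PySem.Chars.isdigit d == PySem.Chars.isdigit c)).length + a1.toNat)
              (c :: cs.takeWhile (fun d => PySem.Chars.isdigit d == PySem.Chars.isdigit c)) = [] :=
          List.drop_of_length_le (by omega)
        rw [e1, e2, List.drop_append, hdrop, Nat.add_sub_cancel_left, List.nil_append]
        congr 1
        omega
termination_by l.length
decreasing_by
  rw [← hre]
  exact Nat.lt_succ_of_le (List.length_dropWhile_le _ _)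

-- B's zip-with-predecessor pass equals the run-level pending fold
theorem pv_Z (l : List Char) (prev p : List Char)
    (hp : ∀ c, l.head? = some c → PySem.Chars.isdigit c = true → p = prev) :
    (((prev :: (pvRuns l).map (·.2)).zip ((pvRuns l).map (·.2))).filter
        (fun pr => match pr.2 with | [] => false | c :: _ => PySem.Chars.isdigit c)).map
        (fun pr => PySem.List.pyRepeat (PySem.Chars.upper pr.1) ((PySem.Int.ofChars? pr.2).getD 0))
      = ((pvRuns l).foldl pvStepB (p, [])).2 := by
  match l with
  | [] => simp [pvRuns]
  | c :: cs =>
    rw [pvRuns]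
    by_cases hd : PySem.Chars.isdigit c = true
    · have hprev : p = prev := hp c rfl hd
      subst hprev
      have hrec := pv_Z (cs.dropWhile (fun d => PySem.Chars.isdigit d == PySem.Chars.isdigit c))
        (c :: cs.takeWhile (fun d => PySem.Chars.isdigit d == PySem.Chars.isdigit c)) []
        (fun e he hde => by
          have := List.head?_dropWhile_not
            (fun d => PySem.Chars.isdigit d == PySem.Chars.isdigit c) cs
          rw [he] at this
          simp [hd, hde] at this)
      simp only [List.map_cons, List.zip_cons_cons, List.filter_cons, List.foldl_cons]
      simp only [pvStepB, hd, if_pos]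
      rw [pv_foldB_parts]
      simp only [List.map_cons, List.nil_append]
      simp only [hd] at hrec
      rw [hrec]
      rfl
    · have hrec := pv_Z (cs.dropWhile (fun d => PySem.Chars.isdigit d == PySem.Chars.isdigit c))
        (c :: cs.takeWhile (fun d => PySem.Chars.isdigit d == PySem.Chars.isdigit c))
        (c :: cs.takeWhile (fun d => PySem.Chars.isdigit d == PySem.Chars.isdigit c))
        (fun _ _ _ => rfl)
      simp only [List.map_cons, List.zip_cons_cons, List.filter_cons, List.foldl_cons]
      simp only [pvStepB, hd, Bool.false_eq_true, if_false]
      simp only [Bool.not_eq_true] at hd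
      simp only [hd] at hrec
      rw [hrec]
termination_by l.length
decreasing_by
  all_goals exact Nat.lt_succ_of_le (List.length_dropWhile_le _ _)

-- the two final messages coincide
theorem pv_top (l : List Char) :
    pvFinalA (l.foldl pvStepA ([], [], []))
      = PySem.Chars.join []
          (((([] :: pvSegs l).zip (pvSegs l)).filter
              (fun pr => match pr.2 with | [] => false | c :: _ => PySem.Chars.isdigit c)).map
              (fun pr => PySem.List.pyRepeat (PySem.Chars.upper pr.1) ((PySem.Int.ofChars? pr.2).getD 0))) := by
  cases l with
  | nil => decide
  | cons c cs =>
    rw [pv_segs_runs (c :: cs) (by simp)]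
    rw [pv_Z (c :: cs) [] [] (fun _ _ _ => rfl)]
    have h := pv_main (c :: cs) [] [] (Or.inl rfl)
    simpa [PySem.Chars.join_nil] using h

-- ===== VERDICT (by name: the statement is the Claim_ definition above) =====
theorem generate_rage_message_spec : Claim_equal_generate_rage_message := by
  intro text _
  unfold Spec_generate_rage_message generate_rage_message generate_rage_message_alt
  have h := pv_top text.toList
  simp only [h]
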